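-- pv_equiv track=rewrite | github.com/ArolYelizaveta/Computer-graphics-programming | lab4.py | algo_bresenham_line
-- ===== SOURCE A (Python) =====
-- def algo_bresenham_line(x1, y1, x2, y2):
--     pts = [];
--     dx, dy = abs(x2 - x1), abs(y2 - y1);
--     sx = 1 if x1 < x2 else -1;
--     sy = 1 if y1 < y2 else -1;
--     err = dx - dy
--     while True:
--         pts.append((x1, y1))
--         if x1 == x2 and y1 == y2: break
--         e2 = 2 * err
--         if e2 > -dy: err -= dy; x1 += sx
--         if e2 < dx: err += dx; y1 += sy
--     return pts
-- ===== SOURCE B (Python) =====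
-- def algo_bresenham_line(x1, y1, x2, y2):
--     # Closed form: pixel i along the driving axis; the minor coordinate is the
--     # ceiling division -((d_major - 2*i*d_minor) // (2*d_major)), which matches
--     # the symmetric error-term tie-breaking exactly.
--     dx, dy = abs(x2 - x1), abs(y2 - y1)
--     sx = 1 if x1 < x2 else -1
--     sy = 1 if y1 < y2 else -1
--     if dx >= dy:
--         if dx == 0:
--             return [(x1, y1)]
--         return [(x1 + i * sx, y1 + sy * (-((dx - 2 * i * dy) // (2 * dx))))
--                 for i in range(dx + 1)]
--     else:
--         return [(x1 + sx * (-((dy - 2 * i * dx) // (2 * dy))), y1 + i * sy)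
--                 for i in range(dy + 1)]
-- ===== Notes on version B (the rewrite author's own statement) =====
-- stated objective: alternative
-- what changed: Replaces the stateful symmetric-error while-loop by a stateless closed form: each pixel's minor coordinate is computed directly as a ceiling division of the driving-axis index, in a single comprehension with no error accumulator or exit test.
import Mathlib
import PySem

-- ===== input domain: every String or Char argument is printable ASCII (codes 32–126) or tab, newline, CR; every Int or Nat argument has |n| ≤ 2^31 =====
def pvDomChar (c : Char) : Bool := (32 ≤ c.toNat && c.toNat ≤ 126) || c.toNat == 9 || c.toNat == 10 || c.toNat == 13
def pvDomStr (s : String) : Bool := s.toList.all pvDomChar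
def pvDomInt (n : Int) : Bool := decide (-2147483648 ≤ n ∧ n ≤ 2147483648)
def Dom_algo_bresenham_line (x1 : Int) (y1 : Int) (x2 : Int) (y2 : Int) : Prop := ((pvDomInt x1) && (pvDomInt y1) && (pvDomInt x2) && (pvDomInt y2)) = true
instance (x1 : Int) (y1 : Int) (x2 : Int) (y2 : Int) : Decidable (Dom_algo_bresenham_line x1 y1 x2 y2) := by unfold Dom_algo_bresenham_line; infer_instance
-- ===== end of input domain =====

-- B replaces A's stateful symmetric-error while-loop with a stateless closed form
-- (a ceiling division per driving-axis index); same output, same asymptotic cost.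


-- ===== PORT A =====
-- A's `while True` loop, fuel-bounded for totality; dx+dy+1 fuel always suffices
-- (the loop makes exactly max(dx,dy)+1 iterations).
def loopA : Nat → Int → Int → Int → Int → Int → Int → Int → Int → Int → List (Int × Int) → List (Int × Int)
  | 0, _, _, _, _, _, _, _, _, _, acc => acc.reverse
  | f + 1, x1, y1, x2, y2, sx, sy, dx, dy, err, acc =>
    if x1 = x2 ∧ y1 = y2 then ((x1, y1) :: acc).reverse
    else
      let e2 := 2 * err
      let err1 := if e2 > -dy then err - dy else err
      let x1' := if e2 > -dy then x1 + sx else x1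
      let err2 := if e2 < dx then err1 + dx else err1
      let y1' := if e2 < dx then y1 + sy else y1
      loopA f x1' y1' x2 y2 sx sy dx dy err2 ((x1, y1) :: acc)

def algo_bresenham_line (x1 : Int) (y1 : Int) (x2 : Int) (y2 : Int) : List (Int × Int) :=
  let dx := |x2 - x1|
  let dy := |y2 - y1|
  let sx : Int := if x1 < x2 then 1 else -1
  let sy : Int := if y1 < y2 then 1 else -1
  loopA (dx + dy + 1).toNat x1 y1 x2 y2 sx sy dx dy (dx - dy) []

-- ===== PORT B =====
def algo_bresenham_line_alt (x1 : Int) (y1 : Int) (x2 : Int) (y2 : Int) : List (Int × Int) :=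
  let dx := |x2 - x1|
  let dy := |y2 - y1|
  let sx : Int := if x1 < x2 then 1 else -1
  let sy : Int := if y1 < y2 then 1 else -1
  if dx ≥ dy then
    if dx = 0 then [(x1, y1)]
    else (PySem.List.pyRange 0 (dx + 1) 1).map
      (fun i => (x1 + i * sx, y1 + sy * (-(PySem.Int.floordiv (dx - 2 * i * dy) (2 * dx)))))
  else (PySem.List.pyRange 0 (dy + 1) 1).map
      (fun i => (x1 + sx * (-(PySem.Int.floordiv (dy - 2 * i * dx) (2 * dy))), y1 + i * sy))

-- ===== PRECONDITION & SPEC =====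
def Spec_algo_bresenham_line (x1 : Int) (y1 : Int) (x2 : Int) (y2 : Int) (out : List (Int × Int)) : Prop := out = algo_bresenham_line_alt x1 y1 x2 y2
instance (x1 : Int) (y1 : Int) (x2 : Int) (y2 : Int) (out : List (Int × Int)) : Decidable (Spec_algo_bresenham_line x1 y1 x2 y2 out) := by unfold Spec_algo_bresenham_line; infer_instance

-- ===== CLAIM (what is proved, stated in full; the proofs are below) =====
def Claim_equal_algo_bresenham_line : Prop := ∀ (x1 : Int) (y1 : Int) (x2 : Int) (y2 : Int), Dom_algo_bresenham_line x1 y1 x2 y2 → Spec_algo_bresenham_line x1 y1 x2 y2 (algo_bresenham_line x1 y1 x2 y2)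

-- ===== LEMMAS AND PROOFS =====

-- one-step unfolding of A's loop
theorem loopA_succ (f : Nat) (x1 y1 x2 y2 sx sy dx dy err : Int) (acc : List (Int × Int)) :
    loopA (f + 1) x1 y1 x2 y2 sx sy dx dy err acc =
      if x1 = x2 ∧ y1 = y2 then ((x1, y1) :: acc).reverse
      else
        loopA f (if 2 * err > -dy then x1 + sx else x1)
          (if 2 * err < dx then y1 + sy else y1) x2 y2 sx sy dx dy
          (if 2 * err < dx then (if 2 * err > -dy then err - dy else err) + dx
            else (if 2 * err > -dy then err - dy else err))
          ((x1, y1) :: acc) := rfl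

-- divisor-positive quotient uniqueness
theorem pv_div_unique (d q r : Int) (hd : 0 < d) (hr0 : 0 ≤ r) (hr : r < d) :
    (d * q + r) / d = q := by
  rw [add_comm, Int.add_mul_ediv_left _ _ (by omega : d ≠ 0),
    Int.ediv_eq_zero_of_lt hr0 hr, zero_add]

theorem pv_fdiv_unique (d q r n : Int) (hd : 0 < d) (hn : n = d * q + r)
    (hr0 : 0 ≤ r) (hr : r < d) : PySem.Int.floordiv n d = q := by
  rw [PySem.Int.floordiv_eq_ediv_of_pos hd, hn, pv_div_unique d q r hd hr0 hr]

-- x-driven invariant: after k steps, x = x1+k·sx, y = y1+sy·(−q) where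
-- 2dx·q + r = dx − 2k·dy with 0 ≤ r < 2dx, dy−dx < r, and 2err = dx + r − 2dy.
theorem loopA_x (x1 y1 sx sy dx dy : Int) (hdx : 0 < dx) (hdy0 : 0 ≤ dy) (hdxy : dy ≤ dx)
    (hsx : sx = 1 ∨ sx = -1) :
    ∀ (K f : Nat) (k q r err : Int) (acc : List (Int × Int)),
      0 ≤ k → k + K = dx →
      dx - 2 * k * dy = 2 * dx * q + r → 0 ≤ r → r < 2 * dx → dy - dx < r →
      2 * err = dx + r - 2 * dy →
      loopA (K + f + 1) (x1 + k * sx) (y1 + sy * (-q)) (x1 + dx * sx) (y1 + dy * sy)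
        sx sy dx dy err acc
        = acc.reverse ++ (PySem.List.pyRange k (dx + 1) 1).map
            (fun i => (x1 + i * sx, y1 + sy * (-(PySem.Int.floordiv (dx - 2 * i * dy) (2 * dx)))))
  | 0, f, k, q, r, err, acc, hk0, hkK, hEq, hr0, hr2, hrl, herr => by
    have hk : k = dx := by omega
    subst hk
    have hq : q = -dy := by
      have h1 : (2 * k * q + r) / (2 * k) = q := pv_div_unique _ _ _ (by omega) hr0 hr2
      have h2 : (2 * k * (-dy) + k) / (2 * k) = -dy :=
        pv_div_unique _ _ _ (by omega) (by omega) (by omega)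
      have h3 : 2 * k * q + r = 2 * k * (-dy) + k := by linear_combination -hEq
      rw [h3, h2] at h1; omega
    subst hq
    rw [(by omega : 0 + f + 1 = f + 1), loopA_succ]
    rw [if_pos (⟨rfl, by ring⟩ : _ ∧ _)]
    rw [PySem.List.pyRange_one_singleton]
    have hfd : PySem.Int.floordiv (k - 2 * k * dy) (2 * k) = -dy :=
      pv_fdiv_unique _ _ k _ (by omega) (by ring) (by omega) (by omega)
    simp only [List.map_cons, List.map_nil, List.reverse_cons, hfd]
  | K + 1, f, k, q, r, err, acc, hk0, hkK, hEq, hr0, hr2, hrl, herr => by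
    have hklt : k < dx := by omega
    rw [(by omega : K + 1 + f + 1 = (K + f + 1) + 1), loopA_succ]
    rw [if_neg (by
      rintro ⟨hx, -⟩
      rcases hsx with h | h <;> (rw [h] at hx; omega))]
    have hc1 : (2 * err > -dy) := by omega
    rw [if_pos hc1, if_pos hc1]
    have hfd : PySem.Int.floordiv (dx - 2 * k * dy) (2 * dx) = q :=
      pv_fdiv_unique _ _ r _ (by omega) hEq hr0 hr2
    have hrange : PySem.List.pyRange k (dx + 1) 1
        = k :: PySem.List.pyRange (k + 1) (dx + 1) 1 :=
      PySem.List.pyRange_one_cons (by omega)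
    by_cases hc2 : 2 * err < dx
    · rw [if_pos hc2, if_pos hc2]
      have hrec := loopA_x x1 y1 sx sy dx dy hdx hdy0 hdxy hsx K f (k + 1) (q - 1)
        (r - 2 * dy + 2 * dx) (err - dy + dx) ((x1 + k * sx, y1 + sy * (-q)) :: acc)
        (by omega) (by omega) (by linear_combination hEq) (by omega) (by omega)
        (by omega) (by omega)
      rw [(by ring : x1 + k * sx + sx = x1 + (k + 1) * sx),
          (by ring : y1 + sy * (-q) + sy = y1 + sy * (-(q - 1)))]
      rw [hrec, hrange]
      simp [hfd]
    · rw [if_neg hc2, if_neg hc2]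
      have hrec := loopA_x x1 y1 sx sy dx dy hdx hdy0 hdxy hsx K f (k + 1) q
        (r - 2 * dy) (err - dy) ((x1 + k * sx, y1 + sy * (-q)) :: acc)
        (by omega) (by omega) (by linear_combination hEq) (by omega) (by omega)
        (by omega) (by omega)
      rw [(by ring : x1 + k * sx + sx = x1 + (k + 1) * sx)]
      rw [hrec, hrange]
      simp [hfd]

-- y-driven invariant (dy > dx): after k steps, y = y1+k·sy, x = x1+sx·(−q) where
-- 2dy·q + r = dy − 2k·dx with 0 ≤ r < 2dy, and 2err = 2dx − dy − r.
theorem loopA_y (x1 y1 sx sy dx dy : Int) (hdy : 0 < dy) (hdx0 : 0 ≤ dx) (hdxy : dx < dy)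
    (hsy : sy = 1 ∨ sy = -1) :
    ∀ (K f : Nat) (k q r err : Int) (acc : List (Int × Int)),
      0 ≤ k → k + K = dy →
      dy - 2 * k * dx = 2 * dy * q + r → 0 ≤ r → r < 2 * dy →
      2 * err = 2 * dx - dy - r →
      loopA (K + f + 1) (x1 + sx * (-q)) (y1 + k * sy) (x1 + dx * sx) (y1 + dy * sy)
        sx sy dx dy err acc
        = acc.reverse ++ (PySem.List.pyRange k (dy + 1) 1).map
            (fun i => (x1 + sx * (-(PySem.Int.floordiv (dy - 2 * i * dx) (2 * dy))), y1 + i * sy))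
  | 0, f, k, q, r, err, acc, hk0, hkK, hEq, hr0, hr2, herr => by
    have hk : k = dy := by omega
    subst hk
    have hq : q = -dx := by
      have h1 : (2 * k * q + r) / (2 * k) = q := pv_div_unique _ _ _ (by omega) hr0 hr2
      have h2 : (2 * k * (-dx) + k) / (2 * k) = -dx :=
        pv_div_unique _ _ _ (by omega) (by omega) (by omega)
      have h3 : 2 * k * q + r = 2 * k * (-dx) + k := by linear_combination -hEq
      rw [h3, h2] at h1; omega
    subst hq
    rw [(by omega : 0 + f + 1 = f + 1), loopA_succ]
    rw [if_pos (⟨by ring, rfl⟩ : _ ∧ _)]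
    rw [PySem.List.pyRange_one_singleton]
    have hfd : PySem.Int.floordiv (k - 2 * k * dx) (2 * k) = -dx :=
      pv_fdiv_unique _ _ k _ (by omega) (by ring) (by omega) (by omega)
    simp only [List.map_cons, List.map_nil, List.reverse_cons, hfd]
  | K + 1, f, k, q, r, err, acc, hk0, hkK, hEq, hr0, hr2, herr => by
    have hklt : k < dy := by omega
    rw [(by omega : K + 1 + f + 1 = (K + f + 1) + 1), loopA_succ]
    rw [if_neg (by
      rintro ⟨-, hy⟩
      rcases hsy with h | h <;> (rw [h] at hy; omega))]
    have hc2 : (2 * err < dx) := by omega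
    rw [if_pos hc2, if_pos hc2]
    have hfd : PySem.Int.floordiv (dy - 2 * k * dx) (2 * dy) = q :=
      pv_fdiv_unique _ _ r _ (by omega) hEq hr0 hr2
    have hrange : PySem.List.pyRange k (dy + 1) 1
        = k :: PySem.List.pyRange (k + 1) (dy + 1) 1 :=
      PySem.List.pyRange_one_cons (by omega)
    by_cases hc1 : 2 * err > -dy
    · rw [if_pos hc1, if_pos hc1]
      have hrec := loopA_y x1 y1 sx sy dx dy hdy hdx0 hdxy hsy K f (k + 1) (q - 1)
        (r - 2 * dx + 2 * dy) (err - dy + dx) ((x1 + sx * (-q), y1 + k * sy) :: acc)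
        (by omega) (by omega) (by linear_combination hEq) (by omega) (by omega)
        (by omega)
      rw [(by ring : y1 + k * sy + sy = y1 + (k + 1) * sy),
          (by ring : x1 + sx * (-q) + sx = x1 + sx * (-(q - 1)))]
      rw [hrec, hrange]
      simp [hfd]
    · rw [if_neg hc1, if_neg hc1]
      have hrec := loopA_y x1 y1 sx sy dx dy hdy hdx0 hdxy hsy K f (k + 1) q
        (r - 2 * dx) (err + dx) ((x1 + sx * (-q), y1 + k * sy) :: acc)
        (by omega) (by omega) (by linear_combination hEq) (by omega) (by omega)
        (by omega)
      rw [(by ring : y1 + k * sy + sy = y1 + (k + 1) * sy)]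
      rw [hrec, hrange]
      simp [hfd]

-- ===== VERDICT (by name: the statement is the Claim_ definition above) =====
theorem algo_bresenham_line_spec : Claim_equal_algo_bresenham_line := by
  intro x1 y1 x2 y2 _
  unfold Spec_algo_bresenham_line algo_bresenham_line algo_bresenham_line_alt
  set dx := |x2 - x1| with hdx
  set dy := |y2 - y1| with hdy
  set sx : Int := if x1 < x2 then 1 else -1 with hsx
  set sy : Int := if y1 < y2 then 1 else -1 with hsy
  have hdx0 : 0 ≤ dx := abs_nonneg _
  have hdy0 : 0 ≤ dy := abs_nonneg _
  have hsx1 : sx = 1 ∨ sx = -1 := by rw [hsx]; split <;> simp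
  have hsy1 : sy = 1 ∨ sy = -1 := by rw [hsy]; split <;> simp
  have hx2 : x2 = x1 + dx * sx := by
    rw [hdx, hsx]
    rcases lt_trichotomy x1 x2 with h | h | h
    · rw [if_pos h, abs_of_pos (by omega)]; ring
    · rw [h, if_neg (lt_irrefl x2)]; simp
    · rw [if_neg (by omega), abs_of_neg (by omega)]; ring
  have hy2 : y2 = y1 + dy * sy := by
    rw [hdy, hsy]
    rcases lt_trichotomy y1 y2 with h | h | h
    · rw [if_pos h, abs_of_pos (by omega)]; ring
    · rw [h, if_neg (lt_irrefl y2)]; simp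
    · rw [if_neg (by omega), abs_of_neg (by omega)]; ring
  by_cases hge : dx ≥ dy
  · rw [if_pos hge]
    by_cases h0 : dx = 0
    · rw [if_pos h0]
      have hdy0' : dy = 0 := by omega
      have hx12 : x2 = x1 := by rw [hx2, h0]; ring
      have hy12 : y2 = y1 := by rw [hy2, hdy0']; ring
      show loopA (dx + dy + 1).toNat x1 y1 x2 y2 sx sy dx dy (dx - dy) [] = _
      rw [(by omega : (dx + dy + 1).toNat = 0 + 1), loopA_succ]
      rw [if_pos ⟨hx12.symm, hy12.symm⟩]
      simp
    · rw [if_neg h0]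
      have h := loopA_x x1 y1 sx sy dx dy (by omega) hdy0 hge hsx1
        dx.toNat dy.toNat 0 0 dx (dx - dy) []
        (by omega) (by omega) (by ring) (by omega) (by omega) (by omega) (by ring)
      show loopA (dx + dy + 1).toNat x1 y1 x2 y2 sx sy dx dy (dx - dy) [] = _
      rw [(by omega : (dx + dy + 1).toNat = dx.toNat + dy.toNat + 1), hx2, hy2]
      simpa using h
  · rw [if_neg hge]
    have h := loopA_y x1 y1 sx sy dx dy (by omega) hdx0 (by omega) hsy1
      dy.toNat dx.toNat 0 0 dy (dx - dy) []
      (by omega) (by omega) (by ring) (by omega) (by omega) (by ring)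
    show loopA (dx + dy + 1).toNat x1 y1 x2 y2 sx sy dx dy (dx - dy) [] = _
    rw [(by omega : (dx + dy + 1).toNat = dy.toNat + dx.toNat + 1), hx2, hy2]
    simpa using h
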